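-- pv_equiv track=rewrite | github.com/ashiqur3069/CSE221_Bracu | Assignment_4/task6.py | max_diamonds
-- ===== SOURCE A (Python) =====
-- def dfs(grid, visited, row, col):
--     if row < 0 or row >= len(grid) or col < 0 or col >= len(grid[0]) or grid[row][col] == '#' or visited[row][col]:
--         return 0
--
--     visited[row][col] = True
--     diamonds = 0
--     if grid[row][col] == 'D':
--         diamonds += 1
--     sets = [(-1, 0), (1, 0), (0, -1), (0, 1)]
--
--     for x, y in sets:
--         diamonds += dfs(grid, visited, row + x, col + y)
--
--     return diamonds
--
-- def max_diamonds(grid):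
--     max_diamond = 0
--     rows, cols = len(grid), len(grid[0])
--     visited = [[False] * cols for i in range(rows)]
--
--     for i in range(rows):
--         for j in range(cols):
--             if grid[i][j] == '.':
--                 max_diamond = max(max_diamond, dfs(grid, visited, i, j))
--
--     return max_diamond
-- ===== SOURCE B (Python) =====
-- def max_diamonds(grid):
--     max_diamond = 0
--     rows, cols = len(grid), len(grid[0])
--     visited = [[False] * cols for _ in range(rows)]
--
--     for i in range(rows):
--         for j in range(cols):
--             if grid[i][j] == '.':
--                 count = 0
--                 stack = [(i, j)]
--                 while stack:
--                     r, c = stack.pop()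
--                     if r < 0 or r >= rows or c < 0 or c >= cols or grid[r][c] == '#' or visited[r][c]:
--                         continue
--                     visited[r][c] = True
--                     if grid[r][c] == 'D':
--                         count += 1
--                     stack.extend([(r, c + 1), (r, c - 1), (r + 1, c), (r - 1, c)])
--                 max_diamond = max(max_diamond, count)
--
--     return max_diamond
-- ===== Notes on version B (the rewrite author's own statement) =====
-- stated objective: alternative
-- what changed: The recursive flood-fill dfs is replaced by an iterative explicit-stack flood fill inside the same double cell scan, removing recursion entirely.
import Mathlib
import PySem

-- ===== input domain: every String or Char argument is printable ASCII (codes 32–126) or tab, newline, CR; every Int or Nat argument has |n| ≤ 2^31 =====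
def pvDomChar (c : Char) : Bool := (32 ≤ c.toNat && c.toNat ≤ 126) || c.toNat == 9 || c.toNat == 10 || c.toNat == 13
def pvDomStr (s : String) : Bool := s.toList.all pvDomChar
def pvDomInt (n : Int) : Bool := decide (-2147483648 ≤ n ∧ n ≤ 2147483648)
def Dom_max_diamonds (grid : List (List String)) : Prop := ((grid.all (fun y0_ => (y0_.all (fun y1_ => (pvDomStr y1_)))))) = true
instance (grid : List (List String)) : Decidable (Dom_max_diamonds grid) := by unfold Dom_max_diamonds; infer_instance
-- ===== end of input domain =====

-- A's recursive flood-fill dfs vs B's iterative explicit-stack flood fill (same double cell scan);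
-- objective: alternative decomposition (no recursion), same asymptotic cost.

-- ===== PORT A =====
-- shared cell accessors (Pre_ guarantees every access Python performs is in range; the
-- .getD defaults are never reached inside Pre_)
def pvCell (grid : List (List String)) (r c : Int) : String :=
  (PySem.List.pyGet? ((PySem.List.pyGet? grid r).getD []) c).getD ""

def pvVis (v : List (List Bool)) (r c : Int) : Bool :=
  (PySem.List.pyGet? ((PySem.List.pyGet? v r).getD []) c).getD true

def pvMark (v : List (List Bool)) (r c : Int) : List (List Bool) :=
  v.set r.toNat (((PySem.List.pyGet? v r).getD []).set c.toNat true)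

-- the boundary / wall / visited guard shared by A's dfs and B's loop (identical in both Pythons)
def pvBad (grid : List (List String)) (v : List (List Bool)) (r c : Int) : Bool :=
  decide (r < 0) || decide ((grid.length : Int) ≤ r) || decide (c < 0) ||
  decide (((grid.headD []).length : Int) ≤ c) || (pvCell grid r c == "#") || pvVis v r c

-- number of unvisited cells: termination measure and fuel bound
def pvUnvis (v : List (List Bool)) : Nat := (v.map (fun row => row.count false)).sum

-- A's dfs, fuel-guarded (the fuel only makes the recursion structural; dfsA below always
-- supplies enough fuel, so the 0-fuel branch is never reached — dfsF_fuel below)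
def dfsF (grid : List (List String)) : Nat → List (List Bool) → Int → Int → Int × List (List Bool)
  | 0, v, _, _ => (0, v)
  | n+1, v, r, c =>
    if pvBad grid v r c then (0, v)
    else
      let v0 := pvMark v r c
      let d0 : Int := if pvCell grid r c = "D" then 1 else 0
      let p1 := dfsF grid n v0 (r-1) c
      let p2 := dfsF grid n p1.2 (r+1) c
      let p3 := dfsF grid n p2.2 r (c-1)
      let p4 := dfsF grid n p3.2 r (c+1)
      (d0 + p1.1 + p2.1 + p3.1 + p4.1, p4.2)

def dfsA (grid : List (List String)) (v : List (List Bool)) (r c : Int) : Int × List (List Bool) :=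
  dfsF grid (pvUnvis v + 1) v r c

def max_diamonds (grid : List (List String)) : Int :=
  let rows := grid.length
  let cols := (grid.headD []).length
  let init : Int × List (List Bool) := (0, List.replicate rows (List.replicate cols false))
  let st := (PySem.List.pyRange 0 rows 1).foldl (fun st i =>
      (PySem.List.pyRange 0 cols 1).foldl (fun (st : Int × List (List Bool)) j =>
        if pvCell grid i j = "." then
          let p := dfsA grid st.2 i j
          (max st.1 p.1, p.2)
        else st) st) init
  st.1

-- ===== PORT B =====
-- lemmas needed by stackLoop's termination proof (marking an unvisited in-range cell
-- strictly decreases the number of unvisited cells)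
theorem count_false_set_true_lt : ∀ (l : List Bool) (i : Nat), l[i]? = some false →
    (l.set i true).count false < l.count false := by
  intro l
  induction l with
  | nil => intro i h; simp at h
  | cons x xs ih =>
    intro i h
    cases i with
    | zero => simp at h; subst h; simp
    | succ j =>
      simp at h
      have := ih j (by simpa using h)
      simp only [List.set, List.count_cons]
      omega

theorem unvis_set_lt : ∀ (v : List (List Bool)) (n : Nat) (row row' : List Bool),
    v[n]? = some row → row'.count false < row.count false →
    pvUnvis (v.set n row') < pvUnvis v := by
  intro v
  induction v with
  | nil => intro n row row' h; simp at h
  | cons x xs ih =>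
    intro n row row' h hlt
    cases n with
    | zero =>
      simp at h; subst h
      simp only [pvUnvis, List.set, List.map, List.sum_cons]
      omega
    | succ m =>
      simp at h
      have := ih m row row' (by simpa using h) hlt
      simp only [pvUnvis, List.set, List.map, List.sum_cons] at this ⊢
      omega

theorem pvUnvis_mark_lt (v : List (List Bool)) (r c : Int)
    (hr : 0 ≤ r) (hc : 0 ≤ c) (hvis : pvVis v r c = false) :
    pvUnvis (pvMark v r c) < pvUnvis v := by
  unfold pvVis at hvis
  unfold pvMark
  rw [PySem.List.pyGet?_of_nonneg _ hr] at hvis ⊢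
  cases hv : v[r.toNat]? with
  | none => rw [hv] at hvis; simp [PySem.List.pyGet?] at hvis
  | some row =>
    rw [hv] at hvis
    simp only [Option.getD_some] at hvis ⊢
    rw [PySem.List.pyGet?_of_nonneg _ hc] at hvis
    cases hb : row[c.toNat]? with
    | none => rw [hb] at hvis; simp at hvis
    | some b =>
      rw [hb] at hvis
      simp at hvis; subst hvis
      exact unvis_set_lt v r.toNat row _ hv (count_false_set_true_lt row c.toNat hb)

-- iterative DFS: the Lean list head is the top of Source B's stack (its list end)
def stackLoop (grid : List (List String)) (v : List (List Bool))
    (stack : List (Int × Int)) (acc : Int) : Int × List (List Bool) :=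
  match stack with
  | [] => (acc, v)
  | (r, c) :: rest =>
    if h : pvBad grid v r c then stackLoop grid v rest acc
    else
      stackLoop grid (pvMark v r c)
        ((r-1, c) :: (r+1, c) :: (r, c-1) :: (r, c+1) :: rest)
        (acc + (if pvCell grid r c = "D" then 1 else 0))
termination_by (pvUnvis v, stack.length)
decreasing_by
  · exact Prod.Lex.right _ (by simp)
  · apply Prod.Lex.left
    simp only [pvBad, Bool.or_eq_true, decide_eq_true_eq, not_or] at h
    exact pvUnvis_mark_lt v r c (Int.not_lt.mp h.1.1.1.1.1) (Int.not_lt.mp h.1.1.1.2)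
      (by simpa using h.2)

def max_diamonds_alt (grid : List (List String)) : Int :=
  let rows := grid.length
  let cols := (grid.headD []).length
  let init : Int × List (List Bool) := (0, List.replicate rows (List.replicate cols false))
  let st := (PySem.List.pyRange 0 rows 1).foldl (fun st i =>
      (PySem.List.pyRange 0 cols 1).foldl (fun (st : Int × List (List Bool)) j =>
        if pvCell grid i j = "." then
          let p := stackLoop grid st.2 [(i, j)] 0
          (max st.1 p.1, p.2)
        else st) st) init
  st.1

-- ===== PRECONDITION & SPEC =====
-- Pre_ excludes exactly the inputs where Python A raises IndexError: the empty grid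
-- (len(grid[0])) and ragged grids with some row shorter than the first row (grid[i][j]).
def Pre_max_diamonds (grid : List (List String)) : Prop :=
  grid ≠ [] ∧ ∀ row ∈ grid, (grid.headD []).length ≤ row.length
instance (grid : List (List String)) : Decidable (Pre_max_diamonds grid) := by
  unfold Pre_max_diamonds; infer_instance

def pvWitness_max_diamonds : List (List String) :=
  [[".", "D", "#"], ["#", "D", "."], [".", "#", "D"]]

def Spec_max_diamonds (grid : List (List String)) (out : Int) : Prop := out = max_diamonds_alt grid
instance (grid : List (List String)) (out : Int) : Decidable (Spec_max_diamonds grid out) := by unfold Spec_max_diamonds; infer_instance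

-- ===== CLAIM (what is proved, stated in full; the proofs are below) =====
def Claim_equal_max_diamonds : Prop := ∀ (grid : List (List String)), Dom_max_diamonds grid → Pre_max_diamonds grid → Spec_max_diamonds grid (max_diamonds grid)

-- ===== LEMMAS AND PROOFS =====

theorem count_false_set_true : ∀ (l : List Bool) (i : Nat), (l.set i true).count false ≤ l.count false := by
  intro l
  induction l with
  | nil => intro i; simp
  | cons x xs ih =>
    intro i
    cases i with
    | zero => cases x <;> simp
    | succ j =>
      have := ih j
      simp only [List.set, List.count_cons]
      omega

theorem unvis_set_le : ∀ (v : List (List Bool)) (n : Nat) (row row' : List Bool),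
    v[n]? = some row → row'.count false ≤ row.count false →
    pvUnvis (v.set n row') ≤ pvUnvis v := by
  intro v
  induction v with
  | nil => intro n row row' h; simp at h
  | cons x xs ih =>
    intro n row row' h hle
    cases n with
    | zero =>
      simp at h; subst h
      simp only [pvUnvis, List.set, List.map, List.sum_cons]
      omega
    | succ m =>
      simp at h
      have := ih m row row' (by simpa using h) hle
      simp only [pvUnvis, List.set, List.map, List.sum_cons] at this ⊢
      omega

theorem pvUnvis_mark_le (v : List (List Bool)) (r c : Int) (hr : 0 ≤ r) :
    pvUnvis (pvMark v r c) ≤ pvUnvis v := by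
  unfold pvMark
  rw [PySem.List.pyGet?_of_nonneg _ hr]
  cases hv : v[r.toNat]? with
  | none =>
    simp only [Option.getD_none]
    have : v.length ≤ r.toNat := by
      by_contra hlt
      simp [List.getElem?_eq_getElem (by omega : r.toNat < v.length)] at hv
    rw [List.set_eq_of_length_le (by simpa using this)]
  | some row =>
    simp only [Option.getD_some]
    exact unvis_set_le v r.toNat row _ hv (count_false_set_true row c.toNat)

-- consequences of a failing guard
theorem not_bad_facts (grid : List (List String)) (v : List (List Bool)) (r c : Int)
    (h : ¬ pvBad grid v r c = true) : 0 ≤ r ∧ 0 ≤ c ∧ pvVis v r c = false := by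
  simp only [pvBad, Bool.or_eq_true, decide_eq_true_eq, not_or] at h
  refine ⟨by have := h.1.1.1.1.1; omega, by have := h.1.1.1.2; omega, by simpa using h.2⟩

-- the dfs never increases the number of unvisited cells
theorem dfsF_unvis_le (grid : List (List String)) :
    ∀ (n : Nat) (v : List (List Bool)) (r c : Int),
      pvUnvis (dfsF grid n v r c).2 ≤ pvUnvis v := by
  intro n
  induction n with
  | zero => intro v r c; simp [dfsF]
  | succ n ih =>
    intro v r c
    rw [dfsF]
    split
    · exact le_rfl
    · next h =>
      obtain ⟨hr, _, _⟩ := not_bad_facts grid v r c h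
      simp only []
      exact le_trans (ih _ _ _) (le_trans (ih _ _ _) (le_trans (ih _ _ _)
        (le_trans (ih _ _ _) (pvUnvis_mark_le v r c hr))))

-- fuel irrelevance: any fuel above the number of unvisited cells gives the same result
theorem dfsF_fuel (grid : List (List String)) :
    ∀ (k : Nat) (v : List (List Bool)) (r c : Int) (m n : Nat),
      pvUnvis v ≤ k → pvUnvis v < m → pvUnvis v < n →
      dfsF grid m v r c = dfsF grid n v r c := by
  intro k
  induction k with
  | zero =>
    intro v r c m n hk hm hn
    obtain ⟨m', rfl⟩ : ∃ m', m = m' + 1 := ⟨m - 1, by omega⟩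
    obtain ⟨n', rfl⟩ : ∃ n', n = n' + 1 := ⟨n - 1, by omega⟩
    rw [dfsF, dfsF]
    split
    · rfl
    · next h =>
      obtain ⟨hr, hc, hvis⟩ := not_bad_facts grid v r c h
      have := pvUnvis_mark_lt v r c hr hc hvis
      omega
  | succ k ih =>
    intro v r c m n hk hm hn
    obtain ⟨m', rfl⟩ : ∃ m', m = m' + 1 := ⟨m - 1, by omega⟩
    obtain ⟨n', rfl⟩ : ∃ n', n = n' + 1 := ⟨n - 1, by omega⟩
    rw [dfsF, dfsF]
    split
    · rfl
    · next h =>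
      obtain ⟨hr, hc, hvis⟩ := not_bad_facts grid v r c h
      have hlt := pvUnvis_mark_lt v r c hr hc hvis
      simp only []
      have e1 := ih (pvMark v r c) (r-1) c m' n' (by omega) (by omega) (by omega)
      rw [e1]
      have hu1 := dfsF_unvis_le grid n' (pvMark v r c) (r-1) c
      have e2 := ih (dfsF grid n' (pvMark v r c) (r-1) c).2 (r+1) c m' n' (by omega) (by omega) (by omega)
      rw [e2]
      have hu2 := dfsF_unvis_le grid n' (dfsF grid n' (pvMark v r c) (r-1) c).2 (r+1) c
      have e3 := ih (dfsF grid n' (dfsF grid n' (pvMark v r c) (r-1) c).2 (r+1) c).2 r (c-1) m' n' (by omega) (by omega) (by omega)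
      rw [e3]
      have hu3 := dfsF_unvis_le grid n' (dfsF grid n' (dfsF grid n' (pvMark v r c) (r-1) c).2 (r+1) c).2 r (c-1)
      have e4 := ih (dfsF grid n' (dfsF grid n' (dfsF grid n' (pvMark v r c) (r-1) c).2 (r+1) c).2 r (c-1)).2 r (c+1) m' n' (by omega) (by omega) (by omega)
      rw [e4]

-- enough fuel at each state: dfsF with any surplus fuel is dfsA
theorem dfsF_eq_dfsA (grid : List (List String)) (v : List (List Bool)) (r c : Int)
    (m : Nat) (hm : pvUnvis v < m) : dfsF grid m v r c = dfsA grid v r c :=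
  dfsF_fuel grid (pvUnvis v) v r c m (pvUnvis v + 1) le_rfl hm (Nat.lt_succ_self _)

-- the bridge: processing one pushed cell on B's stack is exactly one call of A's dfs
theorem stackLoop_dfs (grid : List (List String)) :
    ∀ (k : Nat) (v : List (List Bool)) (S : List (Int × Int)) (acc : Int) (r c : Int),
      pvUnvis v ≤ k →
      stackLoop grid v ((r, c) :: S) acc =
        stackLoop grid (dfsA grid v r c).2 S (acc + (dfsA grid v r c).1) := by
  intro k
  induction k with
  | zero =>
    intro v S acc r c hk
    rw [stackLoop]
    split
    · next h =>
      have hA : dfsA grid v r c = (0, v) := by rw [dfsA, dfsF, if_pos h]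
      rw [hA]; simp
    · next h =>
      obtain ⟨hr, hc, hvis⟩ := not_bad_facts grid v r c h
      have := pvUnvis_mark_lt v r c hr hc hvis
      omega
  | succ k ih =>
    intro v S acc r c hk
    rw [stackLoop]
    split
    · next h =>
      have hA : dfsA grid v r c = (0, v) := by rw [dfsA, dfsF, if_pos h]
      rw [hA]; simp
    · next h =>
      obtain ⟨hr, hc, hvis⟩ := not_bad_facts grid v r c h
      have hlt := pvUnvis_mark_lt v r c hr hc hvis
      -- unfold the dfs one step on the right
      have hA : dfsA grid v r c =
          (let v0 := pvMark v r c
           let d0 : Int := if pvCell grid r c = "D" then 1 else 0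
           let p1 := dfsA grid v0 (r-1) c
           let p2 := dfsA grid p1.2 (r+1) c
           let p3 := dfsA grid p2.2 r (c-1)
           let p4 := dfsA grid p3.2 r (c+1)
           (d0 + p1.1 + p2.1 + p3.1 + p4.1, p4.2)) := by
        rw [dfsA, dfsF, if_neg h]
        simp only []
        rw [dfsF_eq_dfsA grid (pvMark v r c) (r-1) c (pvUnvis v) hlt]
        rw [dfsF_eq_dfsA grid _ (r+1) c (pvUnvis v) (by
          have := dfsF_unvis_le grid (pvUnvis (pvMark v r c) + 1) (pvMark v r c) (r-1) c
          simp only [dfsA]; omega)]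
        rw [dfsF_eq_dfsA grid _ r (c-1) (pvUnvis v) (by
          have h1 := dfsF_unvis_le grid (pvUnvis (pvMark v r c) + 1) (pvMark v r c) (r-1) c
          have h2 := dfsF_unvis_le grid (pvUnvis (dfsA grid (pvMark v r c) (r-1) c).2 + 1) (dfsA grid (pvMark v r c) (r-1) c).2 (r+1) c
          simp only [dfsA] at *; omega)]
        rw [dfsF_eq_dfsA grid _ r (c+1) (pvUnvis v) (by
          have h1 := dfsF_unvis_le grid (pvUnvis (pvMark v r c) + 1) (pvMark v r c) (r-1) c
          have h2 := dfsF_unvis_le grid (pvUnvis (dfsA grid (pvMark v r c) (r-1) c).2 + 1) (dfsA grid (pvMark v r c) (r-1) c).2 (r+1) c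
          have h3 := dfsF_unvis_le grid (pvUnvis (dfsA grid (dfsA grid (pvMark v r c) (r-1) c).2 (r+1) c).2 + 1) (dfsA grid (dfsA grid (pvMark v r c) (r-1) c).2 (r+1) c).2 r (c-1)
          simp only [dfsA] at *; omega)]
      -- unvisited-count bounds for the chained states
      have h1 : pvUnvis (dfsA grid (pvMark v r c) (r-1) c).2 ≤ pvUnvis (pvMark v r c) := by
        simp only [dfsA]; exact dfsF_unvis_le grid _ _ _ _
      have h2 : pvUnvis (dfsA grid (dfsA grid (pvMark v r c) (r-1) c).2 (r+1) c).2
          ≤ pvUnvis (dfsA grid (pvMark v r c) (r-1) c).2 := by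
        simp only [dfsA]; exact dfsF_unvis_le grid _ _ _ _
      have h3 : pvUnvis (dfsA grid (dfsA grid (dfsA grid (pvMark v r c) (r-1) c).2 (r+1) c).2 r (c-1)).2
          ≤ pvUnvis (dfsA grid (dfsA grid (pvMark v r c) (r-1) c).2 (r+1) c).2 := by
        simp only [dfsA]; exact dfsF_unvis_le grid _ _ _ _
      rw [hA]
      simp only []
      rw [ih (pvMark v r c) _ _ (r-1) c (by omega)]
      rw [ih _ _ _ (r+1) c (by omega)]
      rw [ih _ _ _ r (c-1) (by omega)]
      rw [ih _ _ _ r (c+1) (by omega)]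
      congr 1
      ring

theorem stackLoop_single (grid : List (List String)) (v : List (List Bool)) (r c : Int) :
    stackLoop grid v [(r, c)] 0 = dfsA grid v r c := by
  rw [stackLoop_dfs grid (pvUnvis v) v [] 0 r c le_rfl]
  rw [stackLoop]
  simp

-- ===== VERDICT (by name: the statement is the Claim_ definition above) =====
theorem max_diamonds_spec : Claim_equal_max_diamonds := by
  intro grid _ _
  unfold Spec_max_diamonds max_diamonds max_diamonds_alt
  simp only [stackLoop_single]
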